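-- pv_equiv track=rewrite | github.com/mmercalde/prng_cluster_public | enhanced_gap_aware_reconstruction.py | _predict_lcg
-- ===== SOURCE A (Python) =====
-- from typing import List, Tuple, Dict, Any, Optional
--
-- def _predict_lcg(a: int, c: int, m: int, last_value: int, gap: int, count: int) -> List[int]:
--     """Predict next LCG values"""
--     predictions = []
--     current = last_value
--
--     for _ in range(count):
--         for _ in range(gap):
--             current = (a * current + c) % m
--         predictions.append(current)
--
--     return predictions
-- ===== SOURCE B (Python) =====
-- def _predict_lcg(a: int, c: int, m: int, last_value: int, gap: int, count: int):
--     """Predict next LCG values: compose the gap-step map into one affine map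
--     x -> (A*x + C) % m by square-and-multiply, then apply it count times."""
--     if count <= 0:
--         return []
--     if gap <= 0:
--         # zero steps per prediction: the value never changes
--         return [last_value] * count
--     A, C = 1, 0                      # accumulated affine map (identity)
--     bA, bC = a % m, c % m            # base map x -> (a*x + c) % m
--     e = gap
--     while e > 0:
--         if e % 2 == 1:
--             A, C = (bA * A) % m, (bA * C + bC) % m
--         bA, bC = (bA * bA) % m, (bA * bC + bC) % m
--         e //= 2
--     out = []
--     cur = last_value
--     for _ in range(count):
--         cur = (A * cur + C) % m
--         out.append(cur)
--     return out
-- ===== Notes on version B (the rewrite author's own statement) =====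
-- stated objective: faster
-- what changed: Instead of iterating the LCG step gap times for each of the count predictions, B composes the gap-step transition into a single affine map x -> (A*x + C) % m by square-and-multiply over gap's bits and applies that map once per prediction.
import Mathlib
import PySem

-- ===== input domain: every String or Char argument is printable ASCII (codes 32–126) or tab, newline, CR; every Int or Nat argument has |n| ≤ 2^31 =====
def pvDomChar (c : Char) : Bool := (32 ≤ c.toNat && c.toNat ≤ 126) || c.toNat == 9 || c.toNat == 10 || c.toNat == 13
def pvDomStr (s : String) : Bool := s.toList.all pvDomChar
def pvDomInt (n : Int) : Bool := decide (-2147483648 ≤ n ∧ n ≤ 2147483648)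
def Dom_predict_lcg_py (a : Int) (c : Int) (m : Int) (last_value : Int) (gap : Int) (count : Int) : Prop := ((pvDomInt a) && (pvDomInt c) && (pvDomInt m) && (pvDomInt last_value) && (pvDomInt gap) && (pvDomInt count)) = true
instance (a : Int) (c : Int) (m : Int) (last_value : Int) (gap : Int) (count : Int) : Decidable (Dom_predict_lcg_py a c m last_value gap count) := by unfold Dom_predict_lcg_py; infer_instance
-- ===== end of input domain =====

-- B composes the gap-step LCG map into one affine map x -> (A*x+C) % m by square-and-multiply
-- (O(log gap + count) instead of A's O(gap*count)); return values proved equal wherever A returns.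


-- ===== PORT A =====
-- literal port of A: outer loop over range(count), inner loop over range(gap), append each current
def predict_lcg_py (a : Int) (c : Int) (m : Int) (last_value : Int) (gap : Int) (count : Int) : List Int :=
  ((PySem.List.pyRange 0 count 1).foldl
    (fun (st : List Int × Int) _ =>
      let cur := (PySem.List.pyRange 0 gap 1).foldl
        (fun cur _ => PySem.Int.mod (a * cur + c) m) st.2
      (st.1 ++ [cur], cur))
    ([], last_value)).1

-- ===== PORT B =====
-- B's while loop: square-and-multiply composition of the affine map x -> (a*x+c) % m, gap times
def pvBexp (m : Int) (acc base : Int × Int) (e : Int) : Int × Int :=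
  if h : e ≤ 0 then acc
  else
    pvBexp m
      (if PySem.Int.mod e 2 = 1 then
        (PySem.Int.mod (base.1 * acc.1) m, PySem.Int.mod (base.1 * acc.2 + base.2) m)
      else acc)
      (PySem.Int.mod (base.1 * base.1) m, PySem.Int.mod (base.1 * base.2 + base.2) m)
      (PySem.Int.floordiv e 2)
termination_by e.toNat
decreasing_by
  rw [PySem.Int.floordiv_eq_ediv_of_pos (by norm_num)]
  omega

def predict_lcg_py_alt (a : Int) (c : Int) (m : Int) (last_value : Int) (gap : Int) (count : Int) : List Int :=
  if count ≤ 0 then []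
  else if gap ≤ 0 then List.replicate count.toNat last_value
  else
    let AC := pvBexp m (1, 0) (PySem.Int.mod a m, PySem.Int.mod c m) gap
    ((PySem.List.pyRange 0 count 1).foldl
      (fun (st : List Int × Int) _ =>
        let cur := PySem.Int.mod (AC.1 * st.2 + AC.2) m
        (st.1 ++ [cur], cur))
      ([], last_value)).1

-- ===== PRECONDITION & SPEC =====
-- Pre_ excludes exactly the inputs where Python A raises ZeroDivisionError: m = 0 with at least
-- one modulo actually executed (gap ≥ 1 and count ≥ 1).
def Pre_predict_lcg_py (a : Int) (c : Int) (m : Int) (last_value : Int) (gap : Int) (count : Int) : Prop :=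
  m ≠ 0 ∨ gap ≤ 0 ∨ count ≤ 0
instance (a : Int) (c : Int) (m : Int) (last_value : Int) (gap : Int) (count : Int) : Decidable (Pre_predict_lcg_py a c m last_value gap count) := by unfold Pre_predict_lcg_py; infer_instance
def pvWitness_predict_lcg_py : Int × Int × Int × Int × Int × Int := (5, 3, 16, 7, 3, 4)

def Spec_predict_lcg_py (a : Int) (c : Int) (m : Int) (last_value : Int) (gap : Int) (count : Int) (out : List Int) : Prop := out = predict_lcg_py_alt a c m last_value gap count
instance (a : Int) (c : Int) (m : Int) (last_value : Int) (gap : Int) (count : Int) (out : List Int) : Decidable (Spec_predict_lcg_py a c m last_value gap count out) := by unfold Spec_predict_lcg_py; infer_instance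

-- ===== CLAIM (what is proved, stated in full; the proofs are below) =====
def Claim_equal_predict_lcg_py : Prop := ∀ (a : Int) (c : Int) (m : Int) (last_value : Int) (gap : Int) (count : Int), Dom_predict_lcg_py a c m last_value gap count → Pre_predict_lcg_py a c m last_value gap count → Spec_predict_lcg_py a c m last_value gap count (predict_lcg_py a c m last_value gap count)

-- ===== LEMMAS AND PROOFS =====

-- floor-mod reduction keeps the residue class
theorem pv_fmod_emod (x m : Int) : (Int.fmod x m) % m = x % m := by
  rw [Int.fmod_eq_emod]
  split_ifs with h
  · simp
  · rw [show x % m + m = x % m + m * 1 by ring, Int.add_mul_emod_self_left,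
      Int.emod_emod_of_dvd x dvd_rfl]

theorem pv_fmod_congr {x y : Int} (m : Int) (h : x % m = y % m) :
    Int.fmod x m = Int.fmod y m := by
  rw [Int.fmod_eq_emod, Int.fmod_eq_emod, h]
  have hd : m ∣ x ↔ m ∣ y := by
    rw [Int.dvd_iff_emod_eq_zero, Int.dvd_iff_emod_eq_zero, h]
  by_cases h0 : 0 ≤ m <;> by_cases hx : m ∣ x <;> simp_all

theorem pv_affine_congr {A A' C C' x y : Int} (m : Int)
    (hA : A % m = A' % m) (hC : C % m = C' % m) (hx : x % m = y % m) :
    (A * x + C) % m = (A' * y + C') % m := by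
  rw [Int.add_emod, Int.mul_emod, hA, hC, hx, ← Int.mul_emod, ← Int.add_emod]

-- pure (unreduced) affine pairs: composition, powers, evaluation
def pvCmp (P Q : Int × Int) : Int × Int := (P.1 * Q.1, P.1 * Q.2 + P.2)

def pvPow (P : Int × Int) : Nat → Int × Int
  | 0 => (1, 0)
  | n + 1 => pvCmp P (pvPow P n)

def pvEqv (m : Int) (P Q : Int × Int) : Prop := P.1 % m = Q.1 % m ∧ P.2 % m = Q.2 % m

theorem pvCmp_assoc (P Q R : Int × Int) : pvCmp (pvCmp P Q) R = pvCmp P (pvCmp Q R) := by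
  simp only [pvCmp, Prod.mk.injEq]
  constructor <;> ring

theorem pvCmp_one_left (Q : Int × Int) : pvCmp (1, 0) Q = Q := by
  simp [pvCmp]

theorem pvCmp_one_right (Q : Int × Int) : pvCmp Q (1, 0) = Q := by
  simp [pvCmp]

theorem pvPow_add (P : Int × Int) (i j : Nat) :
    pvPow P (i + j) = pvCmp (pvPow P i) (pvPow P j) := by
  induction i with
  | zero => simp [pvPow, pvCmp_one_left]
  | succ i ih =>
      have : i + 1 + j = (i + j) + 1 := by omega
      rw [this, pvPow, pvPow, ih, pvCmp_assoc]

theorem pvPow_two_mul (P : Int × Int) (q : Nat) :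
    pvPow (pvCmp P P) q = pvPow P (2 * q) := by
  induction q with
  | zero => simp [pvPow]
  | succ q ih =>
      have : 2 * (q + 1) = 2 + 2 * q := by omega
      rw [pvPow, ih, this, pvPow_add]
      congr 1
      simp [pvPow, pvCmp_one_right]

theorem pvEqv_refl (m : Int) (P : Int × Int) : pvEqv m P P := ⟨rfl, rfl⟩

-- the square-and-multiply loop computes base^e ∘ acc, modulo m
theorem pvBexp_eqv (m : Int) : ∀ (n : Nat) (e : Int), e.toNat = n →
    ∀ (acc base accP baseP : Int × Int), pvEqv m acc accP → pvEqv m base baseP →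
    pvEqv m (pvBexp m acc base e) (pvCmp (pvPow baseP e.toNat) accP) := by
  intro n
  induction n using Nat.strong_induction_on with
  | _ n ih =>
    intro e hn acc base accP baseP hacc hbase
    by_cases he : e ≤ 0
    · rw [pvBexp, dif_pos he]
      have : e.toNat = 0 := by omega
      rw [this]
      simpa [pvPow, pvCmp_one_left] using hacc
    · push_neg at he
      rw [pvBexp, dif_neg (by omega)]
      rw [PySem.Int.floordiv_eq_ediv_of_pos (show (0:Int) < 2 by norm_num)]
      have h2 : PySem.Int.floordiv e 2 = e / 2 :=
        PySem.Int.floordiv_eq_ediv_of_pos (by norm_num)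
      have hm2 : PySem.Int.mod e 2 = e % 2 :=
        PySem.Int.mod_eq_emod_of_pos (by norm_num)
      have hlt : (e / 2).toNat < n := by omega
      have hbase' : pvEqv m
          (PySem.Int.mod (base.1 * base.1) m, PySem.Int.mod (base.1 * base.2 + base.2) m)
          (pvCmp baseP baseP) := by
        obtain ⟨hb1, hb2⟩ := hbase
        constructor
        · show Int.fmod (base.1 * base.1) m % m = _ % m
          rw [pv_fmod_emod]
          simpa [pvCmp] using by rw [Int.mul_emod, hb1, ← Int.mul_emod]
        · show Int.fmod (base.1 * base.2 + base.2) m % m = _ % m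
          rw [pv_fmod_emod]
          simpa [pvCmp] using pv_affine_congr m hb1 hb2 hb2
      have he0 : 0 ≤ e / 2 := by omega
      by_cases hr : PySem.Int.mod e 2 = 1
      · -- odd step: acc ← base ∘ acc
        rw [if_pos hr]
        have hacc' : pvEqv m
            (PySem.Int.mod (base.1 * acc.1) m, PySem.Int.mod (base.1 * acc.2 + base.2) m)
            (pvCmp baseP accP) := by
          obtain ⟨hb1, hb2⟩ := hbase
          obtain ⟨ha1, ha2⟩ := hacc
          constructor
          · show Int.fmod (base.1 * acc.1) m % m = _ % m
            rw [pv_fmod_emod]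
            simpa [pvCmp] using by rw [Int.mul_emod, hb1, ha1, ← Int.mul_emod]
          · show Int.fmod (base.1 * acc.2 + base.2) m % m = _ % m
            rw [pv_fmod_emod]
            simpa [pvCmp] using pv_affine_congr m hb1 hb2 ha2
        have key := ih _ hlt (e / 2) rfl _ _ _ _ hacc' hbase'
        have hp : pvCmp (pvPow (pvCmp baseP baseP) (e / 2).toNat) (pvCmp baseP accP)
            = pvCmp (pvPow baseP e.toNat) accP := by
          rw [pvPow_two_mul, ← pvCmp_assoc]
          congr 1
          have he1 : e.toNat = 2 * (e / 2).toNat + 1 := by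
            rw [hm2] at hr; omega
          rw [he1, pvPow_add]
          congr 1
          simp [pvPow, pvCmp_one_right]
        rw [← hp]
        exact key
      · -- even step
        rw [if_neg hr]
        have key := ih _ hlt (e / 2) rfl _ _ _ _ hacc hbase'
        have hp : pvCmp (pvPow (pvCmp baseP baseP) (e / 2).toNat) accP
            = pvCmp (pvPow baseP e.toNat) accP := by
          rw [pvPow_two_mul]
          congr 2
          rw [hm2] at hr
          omega
        rw [← hp]
        exact key

-- evaluating the n-th pure power is n-fold iteration of x -> a*x + c
theorem pvPow_ev (a c x : Int) (n : Nat) :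
    (pvPow (a, c) n).1 * x + (pvPow (a, c) n).2 = (fun z => a * z + c)^[n] x := by
  induction n generalizing x with
  | zero => simp [pvPow]
  | succ n ih =>
      rw [Function.iterate_succ_apply', ← ih]
      simp [pvPow, pvCmp]
      ring

-- iteration respects residue classes
theorem pv_iter_congr (a c m : Int) (n : Nat) {x y : Int} (h : x % m = y % m) :
    (fun z => a * z + c)^[n] x % m = (fun z => a * z + c)^[n] y % m := by
  induction n generalizing x y with
  | zero => simpa using h
  | succ n ih =>
      rw [Function.iterate_succ_apply, Function.iterate_succ_apply]
      exact ih (pv_affine_congr m rfl rfl h)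

-- A's inner loop over a nonempty list = (pure iterate, then one reduction)
theorem pv_inner_fold (a c m : Int) : ∀ (l : List Int), l ≠ [] → ∀ (x : Int),
    l.foldl (fun cur _ => PySem.Int.mod (a * cur + c) m) x
      = Int.fmod ((fun z => a * z + c)^[l.length] x) m := by
  intro l
  induction l with
  | nil => intro h; exact absurd rfl h
  | cons y l ih =>
      intro _ x
      rcases eq_or_ne l [] with hl | hl
      · subst hl
        simp [PySem.Int.mod]
      · rw [List.foldl_cons, ih hl]
        apply pv_fmod_congr
        have : PySem.Int.mod (a * x + c) m % m = (a * x + c) % m := pv_fmod_emod _ m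
        calc ((fun z => a * z + c)^[l.length] (PySem.Int.mod (a * x + c) m)) % m
            = ((fun z => a * z + c)^[l.length] (a * x + c)) % m :=
              pv_iter_congr a c m l.length this
          _ = ((fun z => a * z + c)^[l.length + 1] x) % m := by
              rw [Function.iterate_succ_apply]
          _ = ((fun z => a * z + c)^[(y :: l).length] x) % m := by
              simp

-- appending an unchanged value count times is replicate
theorem pv_const_fold (v : Int) : ∀ (l : List Int) (acc : List Int),
    l.foldl (fun (st : List Int × Int) _ => (st.1 ++ [st.2], st.2)) (acc, v)
      = (acc ++ List.replicate l.length v, v) := by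
  intro l
  induction l with
  | nil => simp
  | cons y l ih =>
      intro acc
      rw [List.foldl_cons, ih]
      simp only [List.length_cons, List.append_assoc, List.cons_append, List.nil_append,
        Prod.mk.injEq, and_true]
      rw [List.replicate_succ]

-- ===== VERDICT (by name: the statement is the Claim_ definition above) =====
theorem predict_lcg_py_spec : Claim_equal_predict_lcg_py := by
  intro a c m last_value gap count _ _
  show predict_lcg_py a c m last_value gap count = predict_lcg_py_alt a c m last_value gap count
  by_cases hc : count ≤ 0
  · rw [predict_lcg_py_alt, if_pos hc]
    rw [predict_lcg_py, PySem.List.pyRange_one_eq_nil (a := 0) (b := count) (by omega)]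
    rfl
  · by_cases hg : gap ≤ 0
    · rw [predict_lcg_py_alt, if_neg hc, if_pos hg]
      rw [predict_lcg_py]
      have hnil : PySem.List.pyRange 0 gap 1 = [] := PySem.List.pyRange_one_eq_nil (by omega)
      have : (fun (st : List Int × Int) (_ : Int) =>
          let cur := (PySem.List.pyRange 0 gap 1).foldl
            (fun cur _ => PySem.Int.mod (a * cur + c) m) st.2
          (st.1 ++ [cur], cur))
          = fun (st : List Int × Int) _ => (st.1 ++ [st.2], st.2) := by
        funext st z
        simp [hnil]
      rw [this, pv_const_fold]
      simp [PySem.List.length_pyRange_one]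
    · -- main case: gap ≥ 1
      rw [predict_lcg_py_alt, if_neg hc, if_neg hg, predict_lcg_py]
      have hAC := pvBexp_eqv m gap.toNat gap rfl (1, 0)
        (PySem.Int.mod a m, PySem.Int.mod c m) (1, 0) (a, c)
        (pvEqv_refl m _) ⟨pv_fmod_emod a m, pv_fmod_emod c m⟩
      rw [pvCmp_one_right] at hAC
      set AC := pvBexp m (1, 0) (PySem.Int.mod a m, PySem.Int.mod c m) gap with hACdef
      obtain ⟨h1, h2⟩ := hAC
      have hstep : ∀ x : Int,
          (PySem.List.pyRange 0 gap 1).foldl (fun cur _ => PySem.Int.mod (a * cur + c) m) x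
            = PySem.Int.mod (AC.1 * x + AC.2) m := by
        intro x
        have hne : PySem.List.pyRange 0 gap 1 ≠ [] := by
          rw [PySem.List.pyRange_one_cons (by omega)]
          exact List.cons_ne_nil _ _
        rw [pv_inner_fold a c m _ hne x, PySem.List.length_pyRange_one]
        show _ = Int.fmod (AC.1 * x + AC.2) m
        apply pv_fmod_congr
        have hsimp : (gap - 0).toNat = gap.toNat := by omega
        rw [hsimp, ← pvPow_ev a c x gap.toNat]
        exact (pv_affine_congr m h1 h2 rfl).symm
      have hfun : (fun (st : List Int × Int) (_ : Int) =>
          let cur := (PySem.List.pyRange 0 gap 1).foldl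
            (fun cur _ => PySem.Int.mod (a * cur + c) m) st.2
          (st.1 ++ [cur], cur))
          = fun (st : List Int × Int) _ =>
              let cur := PySem.Int.mod (AC.1 * st.2 + AC.2) m
              (st.1 ++ [cur], cur) := by
        funext st z
        simp only [hstep]
      rw [hfun]
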